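-- pv_equiv track=rewrite | github.com/gf712/python-cpp | integration/aoc/2024/day1.py | part2
-- ===== SOURCE A (Python) =====
-- def part2(a: list, b: list) -> int:
--     from collections import Counter
--
--     lhs_counter = Counter(b)
--     a_set = set(a)
--
--     result = 0
--     for el in a_set:
--         result += el * lhs_counter[el]
--
--     return result
-- ===== SOURCE B (Python) =====
-- def part2(a: list, b: list) -> int:
--     keep = set(a)
--     return sum([x for x in b if x in keep])
-- ===== Notes on version B (the rewrite author's own statement) =====
-- stated objective: simpler
-- what changed: B eliminates the Counter and the loop over unique elements of a: it filters b by membership in set(a) and sums the surviving elements in one pass (el*count_b[el] equals the sum of el over its occurrences in b).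
import Mathlib
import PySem

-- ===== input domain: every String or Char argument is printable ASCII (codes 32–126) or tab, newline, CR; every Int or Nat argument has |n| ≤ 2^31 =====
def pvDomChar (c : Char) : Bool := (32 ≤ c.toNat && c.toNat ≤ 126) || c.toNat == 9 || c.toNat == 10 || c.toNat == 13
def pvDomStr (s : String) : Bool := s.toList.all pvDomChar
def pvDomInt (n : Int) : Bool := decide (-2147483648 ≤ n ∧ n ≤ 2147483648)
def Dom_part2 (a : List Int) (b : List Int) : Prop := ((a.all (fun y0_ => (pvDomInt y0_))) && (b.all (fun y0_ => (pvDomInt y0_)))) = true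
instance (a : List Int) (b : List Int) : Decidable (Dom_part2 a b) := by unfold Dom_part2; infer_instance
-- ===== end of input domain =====

-- B replaces A's Counter-times-count accumulation over the distinct elements of a by
-- filtering b on membership in set(a) and summing the survivors (simpler decomposition).

-- ===== PORT A =====
def part2 (a : List Int) (b : List Int) : Int :=
  let lhs_counter := PySem.Dict.counter b
  let a_set : PySem.Set Int := PySem.Set.ofList a
  a_set.foldl (fun result el => result + el * lhs_counter.getD el 0) 0

-- ===== PORT B =====
def part2_alt (a : List Int) (b : List Int) : Int :=
  let keep : PySem.Set Int := PySem.Set.ofList a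
  (b.filter (fun x => PySem.Set.contains keep x)).sum

-- ===== PRECONDITION & SPEC =====
def Spec_part2 (a : List Int) (b : List Int) (out : Int) : Prop := out = part2_alt a b
instance (a : List Int) (b : List Int) (out : Int) : Decidable (Spec_part2 a b out) := by unfold Spec_part2; infer_instance

-- ===== CLAIM (what is proved, stated in full; the proofs are below) =====
def Claim_equal_part2 : Prop := ∀ (a : List Int) (b : List Int), Dom_part2 a b → Spec_part2 a b (part2 a b)

-- ===== LEMMAS AND PROOFS =====

-- ∑_{x∈b} (if x = el then x else 0) = el * (count of el in b)
lemma sum_if_eq (b : List Int) (el : Int) :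
    (b.map (fun x => if x = el then x else 0)).sum = el * b.count el := by
  induction b with
  | nil => simp
  | cons y b ih =>
    by_cases h : y = el
    · subst h; simp [ih]; ring
    · simp [h, ih]

-- splitting the guarded sum when the head of s is fresh
lemma split_mem (b : List Int) (el : Int) (s : List Int) (hel : el ∉ s) :
    (b.map (fun x => if x ∈ el :: s then x else 0)).sum
      = (b.map (fun x => if x = el then x else 0)).sum
        + (b.map (fun x => if x ∈ s then x else 0)).sum := by
  induction b with
  | nil => simp
  | cons y b ihb =>
    by_cases hy : y = el
    · subst hy
      have hys : y ∉ s := hel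
      simp only [List.map_cons, List.sum_cons, ihb]
      simp [hys]
      ring
    · by_cases hys : y ∈ s <;>
        · simp only [List.map_cons, List.sum_cons, ihb]
          simp [hy, hys]
          try ring

-- for a duplicate-free s: ∑_{el∈s} el * count_b(el) = ∑_{x∈b} (if x ∈ s then x else 0)
lemma key (s b : List Int) (hs : s.Nodup) :
    (s.map (fun el => el * b.count el)).sum
      = (b.map (fun x => if x ∈ s then x else 0)).sum := by
  induction s with
  | nil => simp
  | cons el s ih =>
    rcases List.nodup_cons.mp hs with ⟨hel, hnd⟩
    rw [List.map_cons, List.sum_cons, ih hnd, split_mem b el s hel, sum_if_eq]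

-- the sum of a filtered list is the sum of the guarded map
lemma filter_sum_eq_map_if (p : Int → Bool) (b : List Int) :
    (b.filter p).sum = (b.map (fun x => if p x then x else 0)).sum := by
  induction b with
  | nil => simp
  | cons y b ih =>
    by_cases h : p y <;> simp [h, ih]

-- ===== VERDICT (by name: the statement is the Claim_ definition above) =====
theorem part2_spec : Claim_equal_part2 := by
  intro a b _
  show part2 a b = part2_alt a b
  unfold part2 part2_alt
  rw [PySem.List.foldl_add]
  simp only [PySem.Dict.getD_counter, zero_add]
  rw [key _ b (PySem.Set.nodup_ofList a), filter_sum_eq_map_if]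
  congr 1
  apply List.map_congr_left
  intro x _
  simp
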